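-- pv_equiv track=rewrite | github.com/hong-seongmin/huggingface-gui | models/analysis/weight_analyzer.py | _analyze_layer_structure
-- ===== SOURCE A (Python) =====
-- from typing import Dict, Any
--
-- def _analyze_layer_structure(model_data: Dict[str, Any]) -> Dict[str, Any]:
--     """Analyze the layer structure of the model."""
--     layers = {}
--     layer_pattern_counts = {}
--
--     for key in model_data.keys():
--         # Extract layer numbers and patterns
--         key_parts = key.split('.')
--
--         # Look for layer patterns
--         for i, part in enumerate(key_parts):
--             if part.isdigit():
--                 layer_num = int(part)
--                 if i > 0:
--                     layer_type = key_parts[i-1]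
--                     if layer_type not in layer_pattern_counts:
--                         layer_pattern_counts[layer_type] = set()
--                     layer_pattern_counts[layer_type].add(layer_num)
--
--     # Convert sets to counts
--     layer_structure = {}
--     for layer_type, layer_nums in layer_pattern_counts.items():
--         layer_structure[layer_type] = {
--             'count': len(layer_nums),
--             'max_layer': max(layer_nums) if layer_nums else 0
--         }
--
--     return layer_structure
-- ===== SOURCE B (Python) =====
-- def _analyze_layer_structure(model_data):
--     """Analyze the layer structure of the model.
--
--     Staged decomposition: (1) flatten keys into (layer_type, layer_num) pairs via
--     adjacent zip of the dot-split parts; (2) for each distinct layer_type in first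
--     occurrence order, recompute its distinct layer-number set by a fresh scan of the
--     flat pair list. No incremental dict-of-sets is maintained."""
--     pairs = []
--     for key in model_data.keys():
--         parts = key.split('.')
--         for prev, cur in zip(parts, parts[1:]):
--             if cur.isdigit():
--                 pairs.append((prev, int(cur)))
--
--     layer_structure = {}
--     for layer_type in dict.fromkeys(t for t, _ in pairs):
--         nums = {n for t, n in pairs if t == layer_type}
--         layer_structure[layer_type] = {'count': len(nums), 'max_layer': max(nums)}
--     return layer_structure
-- ===== Notes on version B (the rewrite author's own statement) =====
-- stated objective: alternative
-- what changed: A makes one pass maintaining a dict mapping layer_type to a growing set of layer numbers and then converts each set to counts; B first flattens all keys into a (layer_type, layer_num) pair list via adjacent zip of the split parts, then for each distinct layer_type (dict.fromkeys order) rebuilds its distinct-number set by a fresh scan of the flat pair list - staged per-type scans instead of an incremental dict of sets.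
import Mathlib
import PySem

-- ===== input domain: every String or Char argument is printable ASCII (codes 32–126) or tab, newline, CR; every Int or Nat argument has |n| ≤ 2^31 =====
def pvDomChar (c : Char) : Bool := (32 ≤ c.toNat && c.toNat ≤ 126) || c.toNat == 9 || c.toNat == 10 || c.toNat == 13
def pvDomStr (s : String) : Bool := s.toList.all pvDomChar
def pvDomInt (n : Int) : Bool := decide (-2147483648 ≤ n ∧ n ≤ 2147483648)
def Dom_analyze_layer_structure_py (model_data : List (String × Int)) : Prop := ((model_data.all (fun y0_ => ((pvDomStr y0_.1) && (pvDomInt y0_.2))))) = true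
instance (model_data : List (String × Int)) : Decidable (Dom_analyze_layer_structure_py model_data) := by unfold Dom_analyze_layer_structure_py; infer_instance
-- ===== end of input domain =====

-- B replaces A's incremental dict-of-sets by a staged decomposition: flatten all keys into a
-- (layer_type, layer_num) pair list via adjacent zip, then rebuild each distinct type's number
-- set by a fresh scan of that flat list (alternative decomposition, not claimed faster).

-- ===== PORT A =====
-- first loop of _analyze_layer_structure: layer_pattern_counts, a dict layer_type -> set of layer numbers
def pvA_lpc (model_data : List (String × Int)) : PySem.Dict String (PySem.Set Int) :=
  model_data.foldl (fun d kv =>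
    let key_parts := (PySem.Str.split? kv.1 ".").getD []   -- '.' ≠ '', so split? never returns none
    (PySem.List.enumerate key_parts).foldl (fun d ip =>
      if PySem.Str.strIsdigit ip.2 then
        let layer_num : Int := (PySem.Int.ofStr? ip.2).getD 0   -- isdigit → int() succeeds
        if 0 < ip.1 then
          let layer_type := PySem.List.pyGetD key_parts (ip.1 - 1) ""  -- 0 < i < len: in range
          d.insert layer_type (PySem.Set.add (d.getD layer_type PySem.Set.empty) layer_num)
        else d
      else d) d)
    PySem.Dict.empty

-- literal port of _analyze_layer_structure; dict values of model_data are never read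
def analyze_layer_structure_py (model_data : List (String × Int)) : List (String × List (String × Int)) :=
  let lpc := pvA_lpc model_data
  -- convert sets to counts (max over a set without key: order-independent, hence exact)
  let layer_structure : PySem.Dict String (List (String × Int)) :=
    lpc.items.foldl (fun out p =>
      out.insert p.1 [("count", (p.2.length : Int)),
                      ("max_layer", match PySem.List.max? p.2 (fun x => x) with
                                    | some m => m
                                    | none => 0)]) PySem.Dict.empty
  layer_structure.items

-- ===== PORT B =====
-- pair-extraction loop of Source B: zip(parts, parts[1:]) over each dot-split key
def pvPairsB (model_data : List (String × Int)) : List (String × Int) :=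
  model_data.foldl (fun pairs kv =>
    let parts := (PySem.Str.split? kv.1 ".").getD []   -- '.' ≠ ''
    (parts.zip parts.tail).foldl (fun pairs pc =>
      if PySem.Str.strIsdigit pc.2 then pairs ++ [(pc.1, (PySem.Int.ofStr? pc.2).getD 0)]
      else pairs) pairs) []

def analyze_layer_structure_py_alt (model_data : List (String × Int)) : List (String × List (String × Int)) :=
  let pairs := pvPairsB model_data
  -- for layer_type in dict.fromkeys(t for t, _ in pairs): fresh scan of pairs per type
  ((PySem.List.dedup (pairs.map Prod.fst)).foldl (fun d layer_type =>
      let nums := PySem.Set.ofList ((pairs.filter (fun p => p.1 == layer_type)).map Prod.snd)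
      d.insert layer_type
        [("count", (nums.length : Int)),
         ("max_layer", match PySem.List.max? nums (fun x => x) with
                       | some m => m
                       | none => 0)])   -- none unreachable: layer_type occurs in pairs, so nums ≠ []
    PySem.Dict.empty).items

-- ===== PRECONDITION & SPEC =====
def Spec_analyze_layer_structure_py (model_data : List (String × Int)) (out : List (String × List (String × Int))) : Prop := out = analyze_layer_structure_py_alt model_data
instance (model_data : List (String × Int)) (out : List (String × List (String × Int))) : Decidable (Spec_analyze_layer_structure_py model_data out) := by unfold Spec_analyze_layer_structure_py; infer_instance

-- ===== CLAIM (what is proved, stated in full; the proofs are below) =====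
def Claim_equal_analyze_layer_structure_py : Prop := ∀ (model_data : List (String × Int)), Dom_analyze_layer_structure_py model_data → Spec_analyze_layer_structure_py model_data (analyze_layer_structure_py model_data)

-- ===== LEMMAS AND PROOFS =====

-- the dict-of-sets update A performs for one (layer_type, layer_num) pair
def pvStep (d : PySem.Dict String (PySem.Set Int)) (p : String × Int) : PySem.Dict String (PySem.Set Int) :=
  d.insert p.1 (PySem.Set.add (d.getD p.1 PySem.Set.empty) p.2)

-- the {'count': …, 'max_layer': …} entry derived from a set of numbers
def pvEntry (s : PySem.Set Int) : List (String × Int) :=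
  [("count", (s.length : Int)),
   ("max_layer", match PySem.List.max? s (fun x => x) with | some m => m | none => 0)]

-- the per-key (layer_type, layer_num) pairs in A's enumerate formulation
def pvKeyPairs (parts : List String) : List (String × Int) :=
  ((PySem.List.enumerate parts).filter (fun ip => decide (0 < ip.1) && PySem.Str.strIsdigit ip.2)).map
    (fun ip => (PySem.List.pyGetD parts (ip.1 - 1) "", (PySem.Int.ofStr? ip.2).getD 0))

def pvAllPairs (model_data : List (String × Int)) : List (String × Int) :=
  model_data.flatMap (fun kv => pvKeyPairs ((PySem.Str.split? kv.1 ".").getD []))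

-- common recursive form of the per-key pair list (previous part, current part)
def pvPairsFrom : String → List String → List (String × Int)
  | _, [] => []
  | a, b :: r =>
      (if PySem.Str.strIsdigit b then [(a, (PySem.Int.ofStr? b).getD 0)] else []) ++ pvPairsFrom b r

-- type/num aggregates of a flat pair list
def pvTypes (l : List (String × Int)) : List String := PySem.Set.ofList (l.map Prod.fst)
def pvNums (l : List (String × Int)) (t : String) : PySem.Set Int :=
  PySem.Set.ofList ((l.filter (fun p => p.1 == t)).map Prod.snd)

lemma pvInnerA (parts : List String) (d : PySem.Dict String (PySem.Set Int)) :
    (PySem.List.enumerate parts).foldl (fun d ip =>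
      if PySem.Str.strIsdigit ip.2 then
        if 0 < ip.1 then
          d.insert (PySem.List.pyGetD parts (ip.1 - 1) "")
            (PySem.Set.add (d.getD (PySem.List.pyGetD parts (ip.1 - 1) "") PySem.Set.empty)
              ((PySem.Int.ofStr? ip.2).getD 0))
        else d
      else d) d
    = (pvKeyPairs parts).foldl pvStep d := by
  refine (PySem.List.foldl_congr_mem
    (g := fun (d : PySem.Dict String (PySem.Set Int)) (ip : Int × String) =>
      if decide (0 < ip.1) && PySem.Str.strIsdigit ip.2 then
        pvStep d (PySem.List.pyGetD parts (ip.1 - 1) "", (PySem.Int.ofStr? ip.2).getD 0)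
      else d) _ _ _ ?_).trans ?_
  · intro d ip _
    by_cases hd : PySem.Str.strIsdigit ip.2 = true <;> by_cases hi : (0 : Int) < ip.1 <;>
      simp [*, pvStep]
  · rw [PySem.List.foldl_if_eq_foldl_filter]
    simp only [pvKeyPairs]
    rw [List.foldl_map]

lemma pvLpc_eq (model_data : List (String × Int)) :
    pvA_lpc model_data = (pvAllPairs model_data).foldl pvStep PySem.Dict.empty := by
  simp only [pvA_lpc]
  refine (PySem.List.foldl_congr_mem
    (g := fun (d : PySem.Dict String (PySem.Set Int)) (kv : String × Int) =>
      (pvKeyPairs ((PySem.Str.split? kv.1 ".").getD [])).foldl pvStep d) _ _ _ ?_).trans ?_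
  · intro d kv _
    exact pvInnerA _ d
  · simp only [pvAllPairs]
    rw [List.foldl_flatMap]

lemma pvNodup (l : List (String × Int)) :
    ((l.foldl pvStep PySem.Dict.empty)).keys.Nodup :=
  PySem.Dict.nodup_keys_foldl_insert_key l (fun p => p.1)
    (fun d p => PySem.Set.add (d.getD p.1 PySem.Set.empty) p.2) PySem.Dict.empty (by simp [pysem])

lemma pvConv_eq (d : PySem.Dict String (PySem.Set Int)) (hnd : d.keys.Nodup) :
    (d.items.foldl (fun out p =>
        out.insert p.1 [("count", (p.2.length : Int)),
                        ("max_layer", match PySem.List.max? p.2 (fun x => x) with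
                                      | some m => m
                                      | none => 0)]) PySem.Dict.empty).items
    = d.items.map (fun q => (q.1, pvEntry q.2)) := by
  have h := PySem.Dict.items_foldl_insert_fresh (l := d.items)
      (k := fun p : String × PySem.Set Int => p.1)
      (v := fun p : String × PySem.Set Int => pvEntry p.2) (d := PySem.Dict.empty)
      (fun a _ => by simp [pysem]) (by simpa [PySem.Dict.keys] using hnd)
  simpa [pvEntry] using h

-- A's enumerate/pyGetD extraction computes pvPairsFrom (generalised over the consumed prefix)
lemma pvEnumPairs (rest : List String) : ∀ (pre : List String) (a : String),
    ((PySem.List.enumerate rest ((pre.length : Int) + 1)).filter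
        (fun ip => decide (0 < ip.1) && PySem.Str.strIsdigit ip.2)).map
      (fun ip => (PySem.List.pyGetD (pre ++ a :: rest) (ip.1 - 1) "",
                  (PySem.Int.ofStr? ip.2).getD 0))
    = pvPairsFrom a rest := by
  induction rest with
  | nil => intro pre a; simp [PySem.List.enumerate_nil, pvPairsFrom]
  | cons b r ih =>
      intro pre a
      have hpos : (0 : Int) < (pre.length : Int) + 1 := by positivity
      have hidx : PySem.List.pyGetD (pre ++ a :: b :: r) ((pre.length : Int) + 1 - 1) "" = a := by
        have : ((pre.length : Int) + 1 - 1) = (pre.length : Int) := by ring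
        rw [this]
        simp [PySem.List.pyGetD]  -- index |pre| of pre ++ a :: _ selects a
      have htail :
          ((PySem.List.enumerate r ((pre.length : Int) + 1 + 1)).filter
              (fun ip => decide (0 < ip.1) && PySem.Str.strIsdigit ip.2)).map
            (fun ip => (PySem.List.pyGetD (pre ++ a :: b :: r) (ip.1 - 1) "",
                        (PySem.Int.ofStr? ip.2).getD 0))
          = pvPairsFrom b r := by
        have h := ih (pre ++ [a]) b
        simpa [List.append_assoc, add_assoc] using h
      by_cases hd : PySem.Str.strIsdigit b = true
      · simp only [PySem.List.enumerate_cons, List.filter_cons, pvPairsFrom, hd]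
        simp only [hpos, decide_true, Bool.true_and, if_true, List.map_cons, hidx,
          List.singleton_append]
        exact congrArg (List.cons _) htail
      · simp only [PySem.List.enumerate_cons, List.filter_cons, pvPairsFrom, hd]
        simp only [hpos, decide_true, Bool.true_and]
        exact htail

lemma pvKeyPairs_eq (parts : List String) :
    pvKeyPairs parts = match parts with
                       | [] => []
                       | a :: rest => pvPairsFrom a rest := by
  cases parts with
  | nil => rfl
  | cons a rest =>
      simp only [pvKeyPairs, PySem.List.enumerate, List.filter_cons]
      have h0 : (decide ((0 : Int) < 0) && PySem.Str.strIsdigit a) = false := by simp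
      rw [h0]
      have h := pvEnumPairs rest [] a
      simpa using h

-- B's zip extraction computes the same pvPairsFrom
lemma pvZipPairs (rest : List String) : ∀ (a : String),
    (((a :: rest).zip rest).filter (fun pc => PySem.Str.strIsdigit pc.2)).map
      (fun pc => (pc.1, (PySem.Int.ofStr? pc.2).getD 0))
    = pvPairsFrom a rest := by
  induction rest with
  | nil => intro a; simp [pvPairsFrom]
  | cons b r ih =>
      intro a
      by_cases hd : PySem.Chars.strIsdigit b.toList = true
      · simp only [List.zip_cons_cons, List.filter_cons, PySem.Str.strIsdigit, hd, if_true,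
          List.map_cons, pvPairsFrom, List.singleton_append]
        exact congrArg (List.cons _) (ih b)
      · simp only [List.zip_cons_cons, List.filter_cons, PySem.Str.strIsdigit, pvPairsFrom]
        simp only [hd, if_false, List.nil_append, Bool.false_eq_true]
        exact ih b

lemma pvPairsB_eq (model_data : List (String × Int)) :
    pvPairsB model_data = pvAllPairs model_data := by
  simp only [pvPairsB]
  refine (PySem.List.foldl_congr_mem
    (g := fun (pairs : List (String × Int)) (kv : String × Int) =>
      pairs ++ pvKeyPairs ((PySem.Str.split? kv.1 ".").getD [])) _ _ _ ?_).trans ?_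
  · intro acc kv _
    rw [PySem.List.foldl_append_if]
    congr 1
    rcases hp : (PySem.Str.split? kv.1 ".").getD [] with _ | ⟨a, rest⟩
    · simp [pvKeyPairs_eq]
    · have hz : (a :: rest).tail = rest := rfl
      rw [hz, pvZipPairs rest a, pvKeyPairs_eq]
  · simp only [pvAllPairs]
    exact (PySem.List.foldl_append_eq_flatMap _ _ _).trans (List.nil_append _)

-- characterisation of A's grouping fold as per-type aggregates of the flat pair list
lemma pvFold_items (l : List (String × Int)) :
    (l.foldl pvStep PySem.Dict.empty).items
      = (pvTypes l).map (fun t => (t, pvNums l t)) := by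
  induction l using List.reverseRecOn with
  | nil => rfl
  | append_singleton l p ih =>
      rw [List.foldl_append, List.foldl_cons, List.foldl_nil]
      have hkeys : (l.foldl pvStep PySem.Dict.empty).keys = pvTypes l := by
        simp only [PySem.Dict.keys, ih, List.map_map]
        exact (List.map_congr_left fun t _ => rfl).trans (List.map_id _)
      have hnd : (l.foldl pvStep PySem.Dict.empty).keys.Nodup := pvNodup l
      have htypes' : pvTypes (l ++ [p]) = PySem.Set.add (pvTypes l) p.1 := by
        simp only [pvTypes, List.map_append]
        exact PySem.Set.ofList_append_singleton _ _
      have hnums_ne : ∀ t, t ≠ p.1 → pvNums (l ++ [p]) t = pvNums l t := by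
        intro t ht
        simp only [pvNums, List.filter_append, List.filter_cons, List.filter_nil]
        have : (p.1 == t) = false := by simp [Ne.symm ht]
        simp [this]
      have hnums_eq : pvNums (l ++ [p]) p.1 = PySem.Set.add (pvNums l p.1) p.2 := by
        simp only [pvNums, List.filter_append, List.filter_cons, List.filter_nil]
        simp [PySem.Set.ofList_append_singleton]
      by_cases hm : p.1 ∈ pvTypes l
      · have hc : (l.foldl pvStep PySem.Dict.empty).contains p.1 = true := by
          rw [PySem.Dict.contains_eq_decide_mem_keys, hkeys]; simpa using hm
        have hmemit : (p.1, pvNums l p.1) ∈ (l.foldl pvStep PySem.Dict.empty).items := by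
          rw [ih]; exact List.mem_map_of_mem hm
        have hget : (l.foldl pvStep PySem.Dict.empty).getD p.1 PySem.Set.empty = pvNums l p.1 :=
          PySem.Dict.getD_of_mem_items _ hmemit hnd _
        show ((l.foldl pvStep PySem.Dict.empty).insert p.1 _).items = _
        rw [hget, PySem.Dict.items_insert_of_contains _ _ hc, ih, List.map_map, htypes',
            PySem.Set.add_of_mem hm]
        refine List.map_congr_left ?_
        intro t _
        by_cases htp : t = p.1
        · subst htp
          simp [hnums_eq]
        · have : (t == p.1) = false := by simp [htp]
          simp [Function.comp, this, hnums_ne t htp]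
      · have hc : (l.foldl pvStep PySem.Dict.empty).contains p.1 = false := by
          rw [PySem.Dict.contains_eq_decide_mem_keys, hkeys]; simpa using hm
        have hget : (l.foldl pvStep PySem.Dict.empty).getD p.1 PySem.Set.empty = PySem.Set.empty :=
          PySem.Dict.getD_of_not_contains _ _ hc
        have hfilter : l.filter (fun q => q.1 == p.1) = [] := by
          rw [List.filter_eq_nil_iff]
          intro q hq hbeq
          apply hm
          have : q.1 = p.1 := by simpa using hbeq
          simp only [pvTypes, PySem.Set.mem_ofList]
          exact this ▸ List.mem_map_of_mem hq
        have hnew : pvNums (l ++ [p]) p.1 = PySem.Set.add PySem.Set.empty p.2 := by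
          simp only [pvNums, List.filter_append, hfilter, List.filter_cons, List.filter_nil]
          simp only [beq_self_eq_true, if_true, List.nil_append, List.map_cons, List.map_nil]
          exact PySem.Set.ofList_eq_self_of_nodup _ (List.nodup_singleton _)
        show ((l.foldl pvStep PySem.Dict.empty).insert p.1 _).items = _
        rw [hget, PySem.Dict.items_insert_of_not_contains _ _ hc, ih, htypes',
            PySem.Set.add_of_not_mem hm, List.map_append]
        congr 1
        · refine List.map_congr_left ?_
          intro t ht
          have htp : t ≠ p.1 := fun h => hm (h ▸ ht)
          rw [hnums_ne t htp]
        · simp [hnew]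

-- ===== VERDICT (by name: the statement is the Claim_ definition above) =====
theorem analyze_layer_structure_py_spec : Claim_equal_analyze_layer_structure_py := by
  intro md _
  unfold Spec_analyze_layer_structure_py
  have hA : analyze_layer_structure_py md
      = (pvTypes (pvAllPairs md)).map (fun t => (t, pvEntry (pvNums (pvAllPairs md) t))) := by
    simp only [analyze_layer_structure_py]
    rw [pvLpc_eq, pvConv_eq _ (pvNodup _), pvFold_items, List.map_map]
    rfl
  have hB : analyze_layer_structure_py_alt md
      = (pvTypes (pvAllPairs md)).map (fun t => (t, pvEntry (pvNums (pvAllPairs md) t))) := by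
    simp only [analyze_layer_structure_py_alt]
    rw [pvPairsB_eq]
    have h := PySem.Dict.items_foldl_insert_fresh (l := pvTypes (pvAllPairs md))
        (k := fun t : String => t)
        (v := fun t : String => pvEntry (pvNums (pvAllPairs md) t)) (d := PySem.Dict.empty)
        (fun a _ => by simp [pysem])
        (by rw [List.map_id']
            exact PySem.Set.nodup_ofList ((pvAllPairs md).map Prod.fst))
    simpa [pvTypes, pvNums, pvEntry] using h
  rw [hA, hB]
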